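-- pv_equiv track=rewrite | github.com/Young-Ah-Kim/programmers | py/138476(귤 고르기).py | solution
-- ===== SOURCE A (Python) =====
-- def solution(k, tangerine):
--     t_dict = {}
--
--     for n in tangerine:
--         if n not in t_dict:
--             t_dict[n] = 1
--         elif n in t_dict:
--             t_dict[n] += 1
--
--     sorted_t = sorted(t_dict.items(), key = lambda x: -x[1])
--
--     temp = []
--     count = 0
--     for key, v in sorted_t:
--         count += v
--         temp.append(key)
--         if count >= k:
--             break
--
--     return len(temp)
-- ===== SOURCE B (Python) =====
-- def solution(k, tangerine):
--     # Count each size, bucket the counts by frequency, then walk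
--     # frequencies from the largest possible count down (no comparison sort).
--     counts = {}
--     for n in tangerine:
--         counts[n] = counts.get(n, 0) + 1
--     buckets = {}
--     for c in counts.values():
--         buckets[c] = buckets.get(c, 0) + 1
--     total = 0
--     taken = 0
--     for c in range(len(tangerine), 0, -1):
--         for _ in range(buckets.get(c, 0)):
--             total += c
--             taken += 1
--             if total >= k:
--                 return taken
--     return taken
-- ===== Notes on version B (the rewrite author's own statement) =====
-- stated objective: alternative
-- what changed: Replaces the comparison sort of (size, count) pairs by a counting-sort bucket scan: counts are bucketed by frequency into a dict and walked from the largest possible frequency down, so no sort is performed.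
import Mathlib
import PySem

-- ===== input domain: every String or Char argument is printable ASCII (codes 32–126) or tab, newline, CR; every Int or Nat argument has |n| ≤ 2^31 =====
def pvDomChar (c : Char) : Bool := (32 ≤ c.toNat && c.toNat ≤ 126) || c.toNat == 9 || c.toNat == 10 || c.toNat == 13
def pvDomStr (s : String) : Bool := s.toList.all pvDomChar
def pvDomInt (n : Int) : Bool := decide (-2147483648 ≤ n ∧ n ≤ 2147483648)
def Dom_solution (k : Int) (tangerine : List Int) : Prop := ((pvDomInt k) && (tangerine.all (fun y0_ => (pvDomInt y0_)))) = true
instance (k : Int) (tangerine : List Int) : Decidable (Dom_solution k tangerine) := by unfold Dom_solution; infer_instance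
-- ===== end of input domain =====

-- B replaces A's comparison sort of (size, count) pairs by a counting-sort bucket scan.

-- ===== PORT A =====
-- the loop 'count += v; temp.append(key); if count >= k: break', returning temp at the end
def aLoop (k : Int) : List (Int × Int) → Int → List Int → List Int
  | [], _, temp => temp
  | (key, v) :: rest, count, temp =>
      if count + v ≥ k then temp ++ [key]
      else aLoop k rest (count + v) (temp ++ [key])

def solution (k : Int) (tangerine : List Int) : Int :=
  -- t_dict build: 'if n not in t_dict: t_dict[n] = 1 elif n in t_dict: t_dict[n] += 1'
  -- (on a present key, 't_dict[n] += 1' is exactly insert n (getD n 0 + 1))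
  let t_dict : PySem.Dict Int Int := tangerine.foldl
    (fun d n =>
      if ¬ (d.contains n = true) then d.insert n 1
      else if d.contains n = true then d.insert n (d.getD n 0 + 1)
      else d)
    PySem.Dict.empty
  let sorted_t := PySem.List.sorted t_dict.items (fun x => -x.2) false
  ((aLoop k sorted_t 0 []).length : Int)

-- ===== PORT B =====
-- inner loop 'for _ in range(buckets.get(c, 0)): total += c; taken += 1; if total >= k: return taken'
-- .inl = early return value, .inr = (total, taken) state at normal exit
def bInner (k c : Int) : Nat → Int → Int → (Int ⊕ (Int × Int))
  | 0, total, taken => .inr (total, taken)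
  | m + 1, total, taken =>
      if total + c ≥ k then .inl (taken + 1)
      else bInner k c m (total + c) (taken + 1)

-- outer loop 'for c in range(len(tangerine), 0, -1): …'
def bOuter (k : Int) (buckets : PySem.Dict Int Int) : List Int → Int → Int → Int
  | [], _, taken => taken
  | c :: cs, total, taken =>
      match bInner k c (buckets.getD c 0).toNat total taken with
      | .inl t => t
      | .inr (total', taken') => bOuter k buckets cs total' taken'

def solution_alt (k : Int) (tangerine : List Int) : Int :=
  let counts : PySem.Dict Int Int := tangerine.foldl
    (fun d n => d.insert n (d.getD n 0 + 1)) PySem.Dict.empty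
  let buckets : PySem.Dict Int Int := counts.values.foldl
    (fun d c => d.insert c (d.getD c 0 + 1)) PySem.Dict.empty
  bOuter k buckets (PySem.List.pyRange (tangerine.length : Int) 0 (-1)) 0 0

-- ===== PRECONDITION & SPEC =====
def Spec_solution (k : Int) (tangerine : List Int) (out : Int) : Prop := out = solution_alt k tangerine
instance (k : Int) (tangerine : List Int) (out : Int) : Decidable (Spec_solution k tangerine out) := by unfold Spec_solution; infer_instance

-- ===== CLAIM (what is proved, stated in full; the proofs are below) =====
def Claim_equal_solution : Prop := ∀ (k : Int) (tangerine : List Int), Dom_solution k tangerine → Spec_solution k tangerine (solution k tangerine)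

-- ===== LEMMAS AND PROOFS =====

-- the common abstraction of both loops: scan a list of counts, stop when the running sum reaches k
def scan (k : Int) : List Int → Int → Int → Int
  | [], _, taken => taken
  | v :: rest, total, taken =>
      if total + v ≥ k then taken + 1
      else scan k rest (total + v) (taken + 1)

theorem aLoop_eq_scan (k : Int) (l : List (Int × Int)) (count : Int) (temp : List Int) :
    ((aLoop k l count temp).length : Int) = scan k (l.map (·.2)) count (temp.length : Int) := by
  induction l generalizing count temp with
  | nil => simp [aLoop, scan]
  | cons p rest ih =>
      obtain ⟨key, v⟩ := p
      simp only [aLoop, scan, List.map]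
      split_ifs with h
      · simp
      · rw [ih]; simp

theorem bInner_eq_scan (k c : Int) (m : Nat) (rest : List Int) (total taken : Int) :
    scan k (List.replicate m c ++ rest) total taken =
      (match bInner k c m total taken with
       | .inl t => t
       | .inr (total', taken') => scan k rest total' taken') := by
  induction m generalizing total taken with
  | zero => simp [bInner]
  | succ m ih =>
      simp only [List.replicate_succ, List.cons_append, scan, bInner]
      split_ifs with h
      · rfl
      · exact ih _ _

theorem bOuter_eq_scan (k : Int) (buckets : PySem.Dict Int Int) (cs : List Int)
    (total taken : Int) :
    bOuter k buckets cs total taken =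
      scan k (cs.flatMap (fun c => List.replicate (buckets.getD c 0).toNat c)) total taken := by
  induction cs generalizing total taken with
  | nil => simp [bOuter, scan]
  | cons c cs ih =>
      simp only [bOuter, List.flatMap_cons]
      rw [bInner_eq_scan]
      cases h : bInner k c (buckets.getD c 0).toNat total taken with
      | inl t => rfl
      | inr s => obtain ⟨t1, t2⟩ := s; exact ih t1 t2

-- counting elements of buckets spread by replicate
theorem count_flatMap_replicate (cs : List Int) (f : Int → Nat) (x : Int) :
    cs.Nodup → (cs.flatMap (fun c => List.replicate (f c) c)).count x = if x ∈ cs then f x else 0 := by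
  induction cs with
  | nil => simp
  | cons c cs ih =>
      intro hnd
      simp only [List.flatMap_cons, List.count_append, ih (List.Nodup.of_cons hnd)]
      by_cases hx : x = c
      · subst hx
        have hxc : x ∉ cs := (List.nodup_cons.mp hnd).1
        simp [hxc]
      · rw [List.count_replicate]
        simp [hx]
        exact fun h => absurd h.symm hx

-- spreading into strictly-descending buckets yields a nonincreasing list
theorem flatMap_replicate_pairwise (cs : List Int) (f : Int → Nat)
    (h : cs.Pairwise (· > ·)) :
    (cs.flatMap (fun c => List.replicate (f c) c)).Pairwise (fun a b => b ≤ a) := by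
  induction cs with
  | nil => simp
  | cons c cs ih =>
      simp only [List.flatMap_cons]
      rw [List.pairwise_append]
      refine ⟨?_, ih h.of_cons, ?_⟩
      · exact List.pairwise_replicate.mpr (Or.inr le_rfl)
      · intro a ha b hb
        rw [List.eq_of_mem_replicate ha]
        simp only [List.mem_flatMap] at hb
        obtain ⟨c', hc', hb⟩ := hb
        rw [List.eq_of_mem_replicate hb]
        exact le_of_lt ((List.pairwise_cons.mp h).1 c' hc')

-- A's dict-building loop is the standard counter loop
theorem aDict_eq_counter (tangerine : List Int) :
    tangerine.foldl
      (fun d n =>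
        if ¬ (d.contains n = true) then d.insert n 1
        else if d.contains n = true then d.insert n (d.getD n 0 + 1)
        else d)
      PySem.Dict.empty = PySem.Dict.counter tangerine := by
  rw [← PySem.Dict.foldl_insert_getD_add_one_eq_counter]
  apply PySem.List.foldl_congr_mem
  intro d n _
  by_cases h : d.contains n = true
  · simp [h]
  · have h0 : d.getD n 0 = 0 :=
      PySem.Dict.getD_of_not_contains d 0 (by simpa using h)
    simp [h, h0]

-- the heart: A's sorted count sequence equals B's bucket-scan count sequence
theorem counts_eq (tangerine : List Int) :
    ((PySem.List.sorted (PySem.Dict.counter tangerine).items (fun x => -x.2) false).map (·.2))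
      = (PySem.List.pyRange (tangerine.length : Int) 0 (-1)).flatMap
          (fun c => List.replicate ((PySem.Dict.counter (PySem.Dict.counter tangerine).values).getD c 0).toNat c) := by
  have hR : (fun c => List.replicate ((PySem.Dict.counter (PySem.Dict.counter tangerine).values).getD c 0).toNat c)
      = fun c => List.replicate (((PySem.Dict.counter tangerine).values).count c) c := by
    funext c
    rw [PySem.Dict.getD_counter]
    simp
  rw [hR]
  have hcs_pw : (PySem.List.pyRange (tangerine.length : Int) 0 (-1)).Pairwise (· > ·) := by
    rw [PySem.List.pyRange_neg_one_eq_reverse, List.pairwise_reverse]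
    exact PySem.List.pairwise_lt_pyRange_one _ _
  have hcs_nd : (PySem.List.pyRange (tangerine.length : Int) 0 (-1)).Nodup :=
    List.Pairwise.imp (fun h => ne_of_gt h) hcs_pw
  have hvbound : ∀ v ∈ (PySem.Dict.counter tangerine).values,
      0 < v ∧ v ≤ (tangerine.length : Int) := by
    intro v hv
    have hv' : v ∈ ((PySem.Dict.counter tangerine).items.map (·.2)) := by
      simpa [PySem.Dict.values] using hv
    rw [PySem.Dict.items_counter] at hv'
    simp only [List.map_map, List.mem_map, Function.comp] at hv'
    obtain ⟨x, hx, rfl⟩ := hv'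
    have hxm : x ∈ tangerine := (PySem.Set.mem_ofList _ _).mp hx
    constructor
    · exact_mod_cast List.count_pos_iff.mpr hxm
    · exact_mod_cast List.count_le_length (l := tangerine) (a := x)
  have hmem' : ∀ v ∈ (PySem.Dict.counter tangerine).values,
      v ∈ PySem.List.pyRange (tangerine.length : Int) 0 (-1) := by
    intro v hv
    rw [PySem.List.mem_pyRange_neg_one]
    exact ⟨(hvbound v hv).1, (hvbound v hv).2⟩
  have hpB : ((PySem.List.pyRange (tangerine.length : Int) 0 (-1)).flatMap
      (fun c => List.replicate (((PySem.Dict.counter tangerine).values).count c) c)).Perm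
      (PySem.Dict.counter tangerine).values := by
    rw [List.perm_iff_count]
    intro x
    rw [count_flatMap_replicate _ _ _ hcs_nd]
    by_cases hx : x ∈ PySem.List.pyRange (tangerine.length : Int) 0 (-1)
    · simp [hx]
    · have hxv : x ∉ (PySem.Dict.counter tangerine).values := fun h => hx (hmem' x h)
      simp [hx, List.count_eq_zero_of_not_mem hxv]
  have hpA : ((PySem.List.sorted (PySem.Dict.counter tangerine).items (fun x => -x.2) false).map (·.2)).Perm
      (PySem.Dict.counter tangerine).values := by
    have := (PySem.List.sorted_perm (PySem.Dict.counter tangerine).items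
      (fun x => -x.2) false).map (·.2)
    simpa [PySem.Dict.values] using this
  have hsortA : ((PySem.List.sorted (PySem.Dict.counter tangerine).items (fun x => -x.2) false).map (·.2)).Pairwise
      (fun a b => b ≤ a) := by
    rw [List.pairwise_map]
    exact (PySem.List.sorted_pairwise (xs := (PySem.Dict.counter tangerine).items)
      (key := fun x => -x.2)).imp (fun h => by simpa using h)
  have hsortB := flatMap_replicate_pairwise (PySem.List.pyRange (tangerine.length : Int) 0 (-1))
    (fun c => ((PySem.Dict.counter tangerine).values).count c) hcs_pw
  exact List.Perm.eq_of_pairwise (fun a b _ _ h1 h2 => le_antisymm h2 h1) hsortA hsortB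
    (hpA.trans hpB.symm)

-- ===== VERDICT (by name: the statement is the Claim_ definition above) =====
theorem solution_spec : Claim_equal_solution := by
  intro k tangerine _
  show solution k tangerine = solution_alt k tangerine
  unfold solution solution_alt
  simp only [aDict_eq_counter, PySem.Dict.foldl_insert_getD_add_one_eq_counter]
  rw [bOuter_eq_scan, aLoop_eq_scan]
  simp only [List.length_nil, Int.ofNat_zero]
  rw [counts_eq]
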